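-- pv_equiv track=rewrite | github.com/alanbui2808/Leetcode | Google/818H_Race_Car/solution.py | solution
-- ===== SOURCE A (Python) =====
-- from collections import deque
--
-- class Node:
--   def __init__(self, moves, position, speed):
--     self.moves, self.position, self.speed = moves, position, speed
--
-- def solution(target):
--   '''
--   Algorithm:
--   (1). BFS on the state where state = (moves, position, speed)
--   (2). When we consider each state, we have 2 options:
--     (2.1). Accelerate by speed to new state (moves+1, position+speed, speed*2)
--     (2.2). Reverse if the next move (children) pass the target (either below or above).
--         The new state is (moves+1, position, speed={-1, 1})
--
--   The reason why we need to save the state info is because we want to avoid revisting the node again.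
--
--   Time complexity: BFS is determined by our states - all combination of (position, speed) we can reach.
--   We know there is a limit to our position, by line 38, soon we overshoot it will reverse immediate, we in the worst
--   case we will visit [-target, target] position. O(T)
--
--   Speed goes by 2 everytime until we reach target, thus O(log(T))
--
--   O(T*log(T))
--   '''
--   queue = deque()
--   queue.append(Node(0, 0, 1))
--   visited = set()
--   visited.add((0, 1))
--
--   while queue:
--     node = queue.popleft()
--     moves, position, speed = node.moves, node.position, node.speed
--
--     if position == target:
--       return moves
--
--     # Accelerate by "A"
--     if (position+speed, speed*2) not in visited:
--       queue.append(Node(moves+1, position+speed, speed*2))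
--       visited.add((position+speed, speed*2))
--
--     # Check if next state overshoot us in order to reserve
--     if (position + speed > target) or (position + speed < target):
--       speed = -1 if speed > 0 else 1
--       # Reverse and keep the position
--       if (position, speed) not in visited:
--         visited.add((position, speed))
--         queue.append(Node(moves+1, position, speed))
-- ===== SOURCE B (Python) =====
-- def solution(target):
--     # Kleene fixed-point iteration of the one-step move relation on the whole
--     # reachable-state set: no queue, no frontier, no visited bookkeeping.
--     def step(states):
--         out = set(states)
--         add = out.add
--         for p, s in states:
--             add((p + s, 2 * s))
--             add((p, -1 if s > 0 else 1))
--         return out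
--     reached = {(0, 1)}
--     n = 0
--     while not any(p == target for p, _ in reached):
--         reached = step(reached)
--         n += 1
--     return n
-- ===== Notes on version B (the rewrite author's own statement) =====
-- stated objective: alternative
-- what changed: Replaces A's BFS (deque of Node objects plus a visited set with discovery-time insertion and overshoot-gated reverse pruning) by Kleene fixed-point iteration: B keeps only the full set of reachable states, applies the unpruned one-step move relation to the whole set each round, and counts rounds until some reached state sits on the target; the proof shows the first hitting round equals BFS depth even without the pruning.
import Mathlib
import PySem

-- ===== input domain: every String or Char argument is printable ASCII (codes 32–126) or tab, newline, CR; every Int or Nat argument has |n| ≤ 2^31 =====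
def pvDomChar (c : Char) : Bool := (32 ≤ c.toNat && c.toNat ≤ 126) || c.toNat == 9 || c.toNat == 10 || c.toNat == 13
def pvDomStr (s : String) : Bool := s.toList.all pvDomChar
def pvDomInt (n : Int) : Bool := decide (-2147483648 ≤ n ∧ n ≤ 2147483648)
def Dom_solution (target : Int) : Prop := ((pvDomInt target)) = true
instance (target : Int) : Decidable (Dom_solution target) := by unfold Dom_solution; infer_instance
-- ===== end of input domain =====

-- B replaces A's BFS (deque of Node objects + visited set) by Kleene fixed-point
-- iteration: it repeatedly applies the one-step move relation to the WHOLE set of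
-- reachable states (no queue, no frontier, no visited bookkeeping, no pruning)
-- and counts the rounds until some reached state sits on the target.

-- ===== PORT A =====
-- fuel bound for the BFS loop (2^2000 - 1, defined without subtraction); the proof
-- shows the loop always returns long before it is exhausted on the stated domain.
def pvNeed : Nat → Nat
  | 0 => 0
  | lf + 1 => 1 + 2 * pvNeed lf

-- queue elements are (moves, position, speed); the deque is the standard two-list
-- functional queue (front, back): the queue's contents are front ++ back.reverse
def pvDeq {α : Type} (front back : List α) : Option (α × List α × List α) :=
  match front with
  | x :: f => some (x, f, back)
  | [] =>
    match back.reverse with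
    | [] => none
    | x :: f => some (x, f, [])

-- visited is Python's set of (position, speed), as a hash set
def runA (t : Int) : Nat → List (Int × Int × Int) → List (Int × Int × Int) →
    Std.HashSet (Int × Int) → Int
  | 0, _, _, _ => 0
  | fuel + 1, front, back, v =>
    match pvDeq front back with
    | none => 0               -- Python would fall off the loop (returning None); never reached
    | some ((mv, p, s), front', back') =>
      if p = t then mv
      else
        -- accelerate by "A"
        let c1 : Int × Int := (p + s, s * 2)
        let bv :=
          if v.contains c1 then (back', v)
          else ((mv + 1, c1.1, c1.2) :: back', v.insert c1)
        -- check if next state overshoots in order to reverse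
        if p + s > t ∨ p + s < t then
          let s' : Int := if s > 0 then -1 else 1
          if bv.2.contains (p, s') then runA t fuel front' bv.1 bv.2
          else runA t fuel front' ((mv + 1, p, s') :: bv.1) (bv.2.insert (p, s'))
        else runA t fuel front' bv.1 bv.2

def solution (target : Int) : Int :=
  runA target (pvNeed 2000 + 1) [(0, 0, 1)] []
    ((∅ : Std.HashSet (Int × Int)).insert (0, 1))

-- ===== PORT B =====
-- Python's set of states as a hash set (iterated only where the result is
-- order-independent: membership tests and building another set)
-- loop body: out.add((p + s, 2 * s)); out.add((p, -1 if s > 0 else 1))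
def pvStep1 (out : Std.HashSet (Int × Int)) (c : Int × Int) : Std.HashSet (Int × Int) :=
  (out.insert (c.1 + c.2, 2 * c.2)).insert (c.1, if c.2 > 0 then -1 else 1)

-- step(states): out = set(states) (a copy), then add both successors of every state
def stepB (states : Std.HashSet (Int × Int)) : Std.HashSet (Int × Int) :=
  states.toList.foldl pvStep1 states

-- while not any(p == target for p, _ in reached): reached = step(reached); n += 1
def runBn (t : Int) : Nat → Int → Std.HashSet (Int × Int) → Int
  | 0, n, _ => n            -- fuel; the proof shows the loop exits before level 2000
  | lf + 1, n, reached =>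
    if reached.toList.any (fun c => c.1 == t) then n
    else runBn t lf (n + 1) (stepB reached)

def solution_alt (target : Int) : Int :=
  runBn target 2000 0 ((∅ : Std.HashSet (Int × Int)).insert (0, 1))

-- ===== PRECONDITION & SPEC =====
def Spec_solution (target : Int) (out : Int) : Prop := out = solution_alt target
instance (target : Int) (out : Int) : Decidable (Spec_solution target out) := by unfold Spec_solution; infer_instance

-- ===== CLAIM (what is proved, stated in full; the proofs are below) =====
def Claim_equal_solution : Prop := ∀ (target : Int), Dom_solution target → Spec_solution target (solution target)

-- ===== LEMMAS AND PROOFS =====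

-- proof-side model of A's BFS over a plain list queue and a PySem.Set, and the
-- per-level candidate list of A (accelerate; reverse unless accelerating hits)
def pvCand (t : Int) (c : Int × Int) : List (Int × Int) :=
  let cand : List (Int × Int) := [(c.1 + c.2, c.2 * 2)]
  if c.1 + c.2 ≠ t then cand ++ [(c.1, if c.2 > 0 then (-1 : Int) else 1)] else cand

-- the UNPRUNED successor list B applies (2*s is Source B's spelling)
def pvSucc (c : Int × Int) : List (Int × Int) :=
  [(c.1 + c.2, 2 * c.2), (c.1, if c.2 > 0 then (-1 : Int) else 1)]

def pvAdd (acc : List (Int × Int) × PySem.Set (Int × Int)) (ch : Int × Int) :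
    List (Int × Int) × PySem.Set (Int × Int) :=
  if acc.2.contains ch then acc else (acc.1 ++ [ch], acc.2.add ch)

def pvExpandNode (t : Int) (acc : List (Int × Int) × PySem.Set (Int × Int)) (c : Int × Int) :
    List (Int × Int) × PySem.Set (Int × Int) :=
  (pvCand t c).foldl pvAdd acc

def pvRunM (t : Int) : Nat → List (Int × Int × Int) → PySem.Set (Int × Int) → Int
  | 0, _, _ => 0
  | _ + 1, [], _ => 0
  | fuel + 1, (mv, p, s) :: rest, v =>
    if p = t then mv
    else
      let c1 : Int × Int := (p + s, s * 2)
      let qv :=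
        if v.contains c1 then (rest, v)
        else (rest ++ [(mv + 1, c1.1, c1.2)], v.add c1)
      if p + s > t ∨ p + s < t then
        let s' : Int := if s > 0 then -1 else 1
        if qv.2.contains (p, s') then pvRunM t fuel qv.1 qv.2
        else pvRunM t fuel (qv.1 ++ [(mv + 1, p, s')]) (qv.2.add (p, s'))
      else pvRunM t fuel qv.1 qv.2

-- level scanner: the level-synchronous view of A's BFS (a proof device)
def pvScanA (t : Int) : Nat → Int → List (Int × Int) → PySem.Set (Int × Int) → Int
  | 0, _, _, _ => 0
  | lf + 1, m, f, v =>
    if f.any (fun c => c.1 == t) then m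
    else
      let r := f.foldl (pvExpandNode t) ([], v)
      pvScanA t lf (m + 1) r.1 r.2

-- tag a frontier with its move count, producing A's queue segment for that level
def pvTag (m : Int) (f : List (Int × Int)) : List (Int × Int × Int) :=
  f.map (fun c => (m, c.1, c.2))

-- one whole BFS level
def pvE (t : Int) (p : List (Int × Int) × PySem.Set (Int × Int)) :
    List (Int × Int) × PySem.Set (Int × Int) :=
  p.1.foldl (pvExpandNode t) ([], p.2)

def pvIterF (t : Int) : Nat → List (Int × Int) × PySem.Set (Int × Int) →
    List (Int × Int) × PySem.Set (Int × Int)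
  | 0, p => p
  | j + 1, p => pvIterF t j (pvE t p)

-- "some frontier within lf levels contains the target position"
def pvHit (t : Int) (lf : Nat) (p : List (Int × Int) × PySem.Set (Int × Int)) : Prop :=
  ∃ j < lf, ∃ c ∈ (pvIterF t j p).1, c.1 = t

lemma pvIterF_succ' (t : Int) (j : Nat) (p : List (Int × Int) × PySem.Set (Int × Int)) :
    pvIterF t (j + 1) p = pvE t (pvIterF t j p) := by
  induction j generalizing p with
  | zero => rfl
  | succ j ih => rw [pvIterF, ih]; rfl

-- ---- shift lemmas: the accumulator list is only appended to ----
lemma pvAdd_shift (l : List (Int × Int)) :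
    ∀ g v, l.foldl pvAdd (g, v) =
      (g ++ (l.foldl pvAdd ([], v)).1, (l.foldl pvAdd ([], v)).2) := by
  induction l with
  | nil => intro g v; simp
  | cons x l ih =>
    intro g v
    have hA : ∀ gg : List (Int × Int), pvAdd (gg, v) x =
        if PySem.Set.contains v x then (gg, v) else (gg ++ [x], PySem.Set.add v x) := fun _ => rfl
    simp only [List.foldl_cons, hA]
    by_cases h : PySem.Set.contains v x
    · simp only [if_pos h]
      exact ih g v
    · simp only [if_neg h, List.nil_append]
      rw [ih (g ++ [x]), ih [x]]
      simp

lemma pvNode_shift (t : Int) (g : List (Int × Int)) (v : PySem.Set (Int × Int))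
    (c : Int × Int) :
    pvExpandNode t (g, v) c =
      (g ++ (pvExpandNode t ([], v) c).1, (pvExpandNode t ([], v) c).2) := by
  unfold pvExpandNode; exact pvAdd_shift _ g v

lemma pvLevel_shift (t : Int) (f : List (Int × Int)) :
    ∀ g v, f.foldl (pvExpandNode t) (g, v) =
      (g ++ (pvE t (f, v)).1, (pvE t (f, v)).2) := by
  induction f with
  | nil => intro g v; simp [pvE]
  | cons x f ih =>
    intro g v
    simp only [List.foldl_cons, pvE]
    rw [pvNode_shift t g v x, ih]
    rw [show (pvExpandNode t ([], v) x) =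
        ((pvExpandNode t ([], v) x).1, (pvExpandNode t ([], v) x).2) from rfl, ih]
    simp

-- ---- length bounds ----
lemma pvAdd_len (l : List (Int × Int)) :
    ∀ g v, (l.foldl pvAdd (g, v)).1.length ≤ g.length + l.length := by
  induction l with
  | nil => intro g v; simp
  | cons x l ih =>
    intro g v
    have hA : pvAdd (g, v) x =
        if PySem.Set.contains v x then (g, v) else (g ++ [x], PySem.Set.add v x) := rfl
    simp only [List.foldl_cons, hA]
    by_cases h : PySem.Set.contains v x
    · simp only [if_pos h]
      exact le_trans (ih g v) (by simp only [List.length_cons]; omega)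
    · simp only [if_neg h]
      refine le_trans (ih _ _) ?_
      simp only [List.length_append, List.length_cons, List.length_nil]
      omega

lemma pvCand_len (t : Int) (c : Int × Int) : (pvCand t c).length ≤ 2 := by
  unfold pvCand; split <;> simp

lemma pvLevel_len (t : Int) (f : List (Int × Int)) :
    ∀ g v, (f.foldl (pvExpandNode t) (g, v)).1.length ≤ g.length + 2 * f.length := by
  induction f with
  | nil => intro g v; simp
  | cons x f ih =>
    intro g v
    simp only [List.foldl_cons]
    have h1 : (pvExpandNode t (g, v) x).1.length ≤ g.length + 2 := by
      have := pvAdd_len (pvCand t x) g v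
      have := pvCand_len t x
      unfold pvExpandNode
      omega
    calc (List.foldl (pvExpandNode t)
            ((pvExpandNode t (g, v) x).1, (pvExpandNode t (g, v) x).2) f).1.length
        ≤ (pvExpandNode t (g, v) x).1.length + 2 * f.length := by
          have := ih (pvExpandNode t (g, v) x).1 (pvExpandNode t (g, v) x).2
          simpa using this
      _ ≤ g.length + 2 * (x :: f).length := by simp [List.length_cons]; omega

-- ---- the queue BFS processes one whole level exactly as the scanner's fold builds it ----
lemma pvMix (t : Int) (f : List (Int × Int)) :
    ∀ g v k (m : Int),
      pvRunM t (f.length + k) (pvTag m f ++ pvTag (m + 1) g) v =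
        (if f.any (fun c => c.1 == t) then m
         else pvRunM t k (pvTag (m + 1) (f.foldl (pvExpandNode t) (g, v)).1)
                (f.foldl (pvExpandNode t) (g, v)).2) := by
  induction f with
  | nil => intro g v k m; simp [pvTag]
  | cons x f ih =>
    intro g v k m
    obtain ⟨p, s⟩ := x
    have hlen : (((p, s) :: f).length + k) = (f.length + k) + 1 := by simp; omega
    rw [hlen]
    rw [show pvTag m ((p, s) :: f) = (m, p, s) :: pvTag m f from rfl, List.cons_append]
    by_cases hp : p = t
    · simp [pvRunM, hp]
    · -- the node is expanded; show the new queue/visited match pvExpandNode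
      have hstep : pvRunM t (f.length + k + 1)
          ((m, p, s) :: (pvTag m f ++ pvTag (m + 1) g)) v =
          pvRunM t (f.length + k)
            (pvTag m f ++ pvTag (m + 1) (g ++ (pvExpandNode t ([], v) (p, s)).1))
            (pvExpandNode t ([], v) (p, s)).2 := by
        by_cases hov : p + s = t
        · -- no reverse candidate
          have hnc : ¬ (p + s > t ∨ p + s < t) := by omega
          simp [pvRunM, hp, pvExpandNode, pvCand, pvAdd, hov, pvTag]
          split_ifs <;> simp
        · have hcnd' : (p + s > t ∨ p + s < t) := by omega
          simp [pvRunM, hp, hcnd', pvExpandNode, pvCand, pvAdd, hov, pvTag]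
          split_ifs <;> simp
      rw [hstep, ih]
      have hfold : List.foldl (pvExpandNode t) (g, v) ((p, s) :: f) =
          List.foldl (pvExpandNode t)
            ((g ++ (pvExpandNode t ([], v) (p, s)).1), (pvExpandNode t ([], v) (p, s)).2) f := by
        simp only [List.foldl_cons]; rw [pvNode_shift]
      rw [hfold]
      have hany : ((p, s) :: f).any (fun c => c.1 == t) = f.any (fun c => c.1 == t) := by
        simp [hp]
      rw [hany]

-- ---- bridge: if some level within lf hits the target, queue run = level scanner ----
lemma pvBridge (t : Int) (lf : Nat) :
    ∀ (f : List (Int × Int)) v (m : Int) (j : Nat),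
      pvHit t lf (f, v) →
      pvRunM t (f.length * pvNeed lf + j) (pvTag m f) v = pvScanA t lf m f v := by
  induction lf with
  | zero => intro f v m j h; obtain ⟨jj, hjj, _⟩ := h; omega
  | succ lf ih =>
    intro f v m j hhit
    by_cases hany : f.any (fun c => c.1 == t)
    · -- found in the current frontier: both return m
      have hne : f ≠ [] := by rintro rfl; simp at hany
      have hlen : 1 ≤ f.length := by
        cases f with | nil => exact absurd rfl hne | cons a l => simp
      have h1 : 1 ≤ pvNeed (lf + 1) := by simp only [pvNeed]; omega
      have hle : f.length ≤ f.length * pvNeed (lf + 1) :=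
        Nat.le_mul_of_pos_right _ (by omega)
      have hfuel : f.length * pvNeed (lf + 1) + j = f.length + (f.length * pvNeed (lf + 1) + j - f.length) := by
        omega
      rw [hfuel]
      have hmix0 := pvMix t f [] v (f.length * pvNeed (lf + 1) + j - f.length) m
      rw [show pvTag (m + 1) ([] : List (Int × Int)) = [] from rfl, List.append_nil] at hmix0
      rw [hmix0, if_pos hany]
      simp [pvScanA, hany]
    · -- expand the level and recurse
      have hhit' : pvHit t lf (pvE t (f, v)) := by
        obtain ⟨jj, hjj, c, hc, hct⟩ := hhit
        cases jj with
        | zero =>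
          exfalso
          simp only [pvIterF] at hc
          have : f.any (fun c => c.1 == t) := by
            simp only [List.any_eq_true]
            exact ⟨c, hc, by simpa using hct⟩
          exact hany this
        | succ jj => exact ⟨jj, by omega, c, by rw [pvIterF] at hc; exact hc, hct⟩
      have hE : (pvE t (f, v)).1.length ≤ 2 * f.length := by
        have := pvLevel_len t f [] v
        simpa [pvE] using this
      -- fuel arithmetic
      have hmul : f.length * pvNeed (lf + 1) = f.length + 2 * (f.length * pvNeed lf) := by
        simp [pvNeed]; ring
      have hle2 : (pvE t (f, v)).1.length * pvNeed lf ≤ 2 * (f.length * pvNeed lf) := by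
        calc (pvE t (f, v)).1.length * pvNeed lf ≤ (2 * f.length) * pvNeed lf :=
              Nat.mul_le_mul_right _ hE
          _ = 2 * (f.length * pvNeed lf) := by ring
      have hfuel : f.length * pvNeed (lf + 1) + j =
          f.length + ((pvE t (f, v)).1.length * pvNeed lf +
            (2 * (f.length * pvNeed lf) + j - (pvE t (f, v)).1.length * pvNeed lf)) := by
        omega
      rw [hfuel]
      have hmix := pvMix t f [] v
        ((pvE t (f, v)).1.length * pvNeed lf +
          (2 * (f.length * pvNeed lf) + j - (pvE t (f, v)).1.length * pvNeed lf)) m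
      rw [show pvTag (m + 1) ([] : List (Int × Int)) = [] from rfl, List.append_nil] at hmix
      rw [hmix, if_neg hany]
      have hEeq : f.foldl (pvExpandNode t) (([] : List (Int × Int)), v) = pvE t (f, v) := rfl
      rw [hEeq]
      rw [show pvE t (f, v) = ((pvE t (f, v)).1, (pvE t (f, v)).2) from rfl] at hEeq ⊢
      rw [ih (pvE t (f, v)).1 (pvE t (f, v)).2 (m + 1) _ (by simpa using hhit')]
      rw [pvScanA, if_neg hany]
      simp only [hEeq]

-- ---- reachability along A's (pruned) candidate relation ----
inductive pvReach (t : Int) : Nat → Int × Int → Prop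
  | zero : pvReach t 0 (0, 1)
  | step {n : Nat} {a b : Int × Int} : pvReach t n a → b ∈ pvCand t a → pvReach t (n + 1) b

lemma pvMem_add (s : PySem.Set (Int × Int)) (x y : Int × Int) (h : x ∈ s) :
    x ∈ PySem.Set.add s y := by
  unfold PySem.Set.add; split <;> simp [h]

lemma pvContains_iff (s : PySem.Set (Int × Int)) (x : Int × Int) :
    PySem.Set.contains s x = true ↔ x ∈ s := by
  unfold PySem.Set.contains
  simp

lemma pvMem_add_self (s : PySem.Set (Int × Int)) (x : Int × Int) :
    x ∈ PySem.Set.add s x := by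
  unfold PySem.Set.add
  split
  · next h => exact (pvContains_iff s x).1 h
  · simp

-- visited only grows along a fold
lemma pvAdd_vmono (l : List (Int × Int)) :
    ∀ g v x, x ∈ v → x ∈ (l.foldl pvAdd (g, v)).2 := by
  induction l with
  | nil => intro g v x h; simpa using h
  | cons y l ih =>
    intro g v x h
    simp only [List.foldl_cons, pvAdd]
    by_cases hc : PySem.Set.contains v y
    · simp only [hc, if_true]; exact ih g v x h
    · simp only [hc]; exact ih _ _ x (pvMem_add v x y h)

lemma pvNode_vmono (t : Int) (g : List (Int × Int)) v (c x : Int × Int) (h : x ∈ v) :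
    x ∈ (pvExpandNode t (g, v) c).2 := pvAdd_vmono _ g v x h

lemma pvLevel_vmono (t : Int) (f : List (Int × Int)) :
    ∀ g v x, x ∈ v → x ∈ (f.foldl (pvExpandNode t) (g, v)).2 := by
  induction f with
  | nil => intro g v x h; simpa using h
  | cons c f ih =>
    intro g v x h
    simp only [List.foldl_cons]
    rw [show pvExpandNode t (g, v) c = ((pvExpandNode t (g, v) c).1, (pvExpandNode t (g, v) c).2) from rfl]
    exact ih _ _ x (pvNode_vmono t g v c x h)

-- every candidate that is processed ends up in the visited set
lemma pvAdd_child_mem (l : List (Int × Int)) :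
    ∀ g v c, c ∈ l → c ∈ (l.foldl pvAdd (g, v)).2 := by
  induction l with
  | nil => intro g v c h; simp at h
  | cons y l ih =>
    intro g v c h
    simp only [List.foldl_cons, pvAdd]
    rcases List.mem_cons.1 h with rfl | h
    · by_cases hc : PySem.Set.contains v c
      · simp only [hc, if_true]
        exact pvAdd_vmono l g v c ((pvContains_iff v c).1 hc)
      · simp only [hc]
        exact pvAdd_vmono l _ _ c (pvMem_add_self v c)
    · by_cases hc : PySem.Set.contains v y
      · simp only [hc, if_true]; exact ih g v c h
      · simp only [hc]; exact ih _ _ c h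

lemma pvLevel_child_mem (t : Int) (f : List (Int × Int)) :
    ∀ g v a b, a ∈ f → b ∈ pvCand t a → b ∈ (f.foldl (pvExpandNode t) (g, v)).2 := by
  induction f with
  | nil => intro g v a b h; simp at h
  | cons c f ih =>
    intro g v a b ha hb
    simp only [List.foldl_cons]
    rw [show pvExpandNode t (g, v) c = ((pvExpandNode t (g, v) c).1, (pvExpandNode t (g, v) c).2) from rfl]
    rcases List.mem_cons.1 ha with rfl | ha
    · exact pvLevel_vmono t f _ _ b (pvAdd_child_mem (pvCand t a) g v b hb)
    · exact ih _ _ a b ha hb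

-- everything ever in visited was listed in some frontier
lemma pvAdd_new_listed (l : List (Int × Int)) :
    ∀ g v x, x ∈ (l.foldl pvAdd (g, v)).2 → x ∈ v ∨ x ∈ (l.foldl pvAdd (g, v)).1 := by
  induction l with
  | nil => intro g v x h; left; simpa using h
  | cons y l ih =>
    intro g v x h
    simp only [List.foldl_cons, pvAdd] at h ⊢
    by_cases hc : PySem.Set.contains v y
    · simp only [hc, if_true] at h ⊢; exact ih g v x h
    · simp only [hc] at h ⊢
      rcases ih _ _ x h with hv | hl
      · unfold PySem.Set.add at hv
        simp only [hc] at hv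
        rcases List.mem_append.1 hv with hv | hv
        · left; exact hv
        · right; simp only [List.mem_singleton] at hv; subst hv
          have : x ∈ g ++ [x] := by simp
          rw [pvAdd_shift]
          simp
      · right; exact hl

lemma pvLevel_list_mono (t : Int) (f : List (Int × Int)) (g : List (Int × Int))
    (v : PySem.Set (Int × Int)) (x : Int × Int) (h : x ∈ g) :
    x ∈ (f.foldl (pvExpandNode t) (g, v)).1 := by
  rw [pvLevel_shift]; simp [h]

lemma pvLevel_new_listed (t : Int) (f : List (Int × Int)) :
    ∀ g v x, x ∈ (f.foldl (pvExpandNode t) (g, v)).2 →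
      x ∈ v ∨ x ∈ (f.foldl (pvExpandNode t) (g, v)).1 := by
  induction f with
  | nil => intro g v x h; left; simpa using h
  | cons c f ih =>
    intro g v x h
    simp only [List.foldl_cons] at h ⊢
    rw [show pvExpandNode t (g, v) c = ((pvExpandNode t (g, v) c).1, (pvExpandNode t (g, v) c).2) from rfl] at h ⊢
    rcases ih _ _ x h with hv | hl
    · rcases pvAdd_new_listed (pvCand t c) g v x hv with hv' | hl'
      · left; exact hv'
      · right; exact pvLevel_list_mono t f _ _ x hl'
    · right; exact hl

-- frontier elements come from candidates of the previous frontier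
lemma pvAdd_list_src (l : List (Int × Int)) :
    ∀ g v x, x ∈ (l.foldl pvAdd (g, v)).1 → x ∈ g ∨ x ∈ l := by
  induction l with
  | nil => intro g v x h; left; simpa using h
  | cons y l ih =>
    intro g v x h
    simp only [List.foldl_cons, pvAdd] at h
    by_cases hc : PySem.Set.contains v y
    · simp only [hc, if_true] at h
      rcases ih g v x h with hg | hl
      · left; exact hg
      · right; exact List.mem_cons_of_mem _ hl
    · simp only [hc] at h
      rcases ih _ _ x h with hg | hl
      · rcases List.mem_append.1 hg with hg | hg
        · left; exact hg
        · right; simp only [List.mem_singleton] at hg; subst hg; exact List.mem_cons_self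
      · right; exact List.mem_cons_of_mem _ hl

lemma pvLevel_list_src (t : Int) (f : List (Int × Int)) :
    ∀ g v x, x ∈ (f.foldl (pvExpandNode t) (g, v)).1 →
      x ∈ g ∨ ∃ a ∈ f, x ∈ pvCand t a := by
  induction f with
  | nil => intro g v x h; left; simpa using h
  | cons c f ih =>
    intro g v x h
    simp only [List.foldl_cons] at h
    rw [show pvExpandNode t (g, v) c = ((pvExpandNode t (g, v) c).1, (pvExpandNode t (g, v) c).2) from rfl] at h
    rcases ih _ _ x h with hg | ⟨a, ha, hx⟩
    · rcases pvAdd_list_src (pvCand t c) g v x hg with hg' | hc'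
      · left; exact hg'
      · right; exact ⟨c, List.mem_cons_self, hc'⟩
    · right; exact ⟨a, List.mem_cons_of_mem _ ha, hx⟩

-- the concrete BFS iterates from the start configuration
def pvP0 : List (Int × Int) × PySem.Set (Int × Int) :=
  ([(0, 1)], PySem.Set.ofList [((0 : Int), (1 : Int))])

def pvIter (t : Int) (j : Nat) : List (Int × Int) × PySem.Set (Int × Int) :=
  pvIterF t j pvP0

lemma pvIter_succ (t : Int) (j : Nat) : pvIter t (j + 1) = pvE t (pvIter t j) := by
  unfold pvIter; exact pvIterF_succ' t j pvP0

lemma pvIter_vmono (t : Int) (j : Nat) (x : Int × Int) (h : x ∈ (pvIter t j).2) :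
    x ∈ (pvIter t (j + 1)).2 := by
  rw [pvIter_succ]
  unfold pvE
  rw [show pvIter t j = ((pvIter t j).1, (pvIter t j).2) from rfl]
  exact pvLevel_vmono t _ _ _ x h

lemma pvIter_vmono_le (t : Int) {i j : Nat} (hij : i ≤ j) (x : Int × Int)
    (h : x ∈ (pvIter t i).2) : x ∈ (pvIter t j).2 := by
  induction j with
  | zero => have : i = 0 := by omega
            subst this; exact h
  | succ j ih =>
    by_cases hj : i = j + 1
    · subst hj; exact h
    · exact pvIter_vmono t j x (ih (by omega))

lemma pvIter_inv2 (t : Int) (i : Nat) :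
    ∀ x, x ∈ (pvIter t i).2 → ∃ j ≤ i, x ∈ (pvIter t j).1 := by
  induction i with
  | zero =>
    intro x h
    refine ⟨0, le_refl 0, ?_⟩
    have : x = ((0 : Int), (1 : Int)) := by
      simpa [pvIter, pvIterF, pvP0, PySem.Set.ofList] using h
    simp [pvIter, pvIterF, pvP0, this]
  | succ i ih =>
    intro x h
    rw [pvIter_succ] at h
    unfold pvE at h
    rw [show pvIter t i = ((pvIter t i).1, (pvIter t i).2) from rfl] at h
    rcases pvLevel_new_listed t _ _ _ x h with hv | hl
    · obtain ⟨j, hj, hx⟩ := ih x hv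
      exact ⟨j, by omega, hx⟩
    · refine ⟨i + 1, le_refl _, ?_⟩
      rw [pvIter_succ]
      unfold pvE
      rw [show pvIter t i = ((pvIter t i).1, (pvIter t i).2) from rfl]
      exact hl

lemma pvReach_mem (t : Int) : ∀ n s, pvReach t n s → s ∈ (pvIter t n).2 := by
  intro n s h
  induction h with
  | zero => simp [pvIter, pvIterF, pvP0, PySem.Set.ofList]
  | @step n a b _ hb ih =>
    obtain ⟨j, hj, ha⟩ := pvIter_inv2 t n a ih
    have : b ∈ (pvIter t (j + 1)).2 := by
      rw [pvIter_succ]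
      unfold pvE
      rw [show pvIter t j = ((pvIter t j).1, (pvIter t j).2) from rfl]
      exact pvLevel_child_mem t _ _ _ a b ha hb
    exact pvIter_vmono_le t (by omega) b this

-- frontier soundness: everything in frontier j is pruned-reachable at depth j
lemma pvIter_sound (t : Int) : ∀ j c, c ∈ (pvIter t j).1 → pvReach t j c := by
  intro j
  induction j with
  | zero =>
    intro c h
    have : c = ((0 : Int), (1 : Int)) := by simpa [pvIter, pvIterF, pvP0] using h
    subst this; exact pvReach.zero
  | succ j ih =>
    intro c h
    rw [pvIter_succ] at h
    unfold pvE at h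
    rw [show pvIter t j = ((pvIter t j).1, (pvIter t j).2) from rfl] at h
    rcases pvLevel_list_src t _ _ _ c h with hg | ⟨a, ha, hc⟩
    · simp at hg
    · exact pvReach.step (ih a ha) hc

-- ---- explicit path construction ----
lemma pvAccel_mem (t : Int) (a : Int × Int) : (a.1 + a.2, a.2 * 2) ∈ pvCand t a := by
  unfold pvCand; split <;> simp

lemma pvRev_mem (t : Int) (q s : Int) (h : q + s ≠ t) :
    (q, if s > 0 then (-1 : Int) else 1) ∈ pvCand t (q, s) := by
  unfold pvCand; simp [h]

lemma pvAccel_chain (t : Int) (k : Nat) :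
    ∀ n0 p s, pvReach t n0 (p, s) →
      pvReach t (n0 + k) (p + s * (2 ^ k - 1), s * 2 ^ k) := by
  induction k with
  | zero => intro n0 p s h; simpa using h
  | succ k ih =>
    intro n0 p s h
    have h1 := ih n0 p s h
    have h2 := pvReach.step h1 (pvAccel_mem t (p + s * (2 ^ k - 1), s * 2 ^ k))
    have e1 : p + s * (2 ^ k - 1) + s * 2 ^ k = p + s * (2 ^ (k + 1) - 1) := by ring
    have e2 : s * 2 ^ k * 2 = s * 2 ^ (k + 1) := by ring
    rw [show n0 + (k + 1) = n0 + k + 1 from rfl]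
    simpa [e1, e2] using h2

lemma pvGo (t : Int) : ∀ d : Nat, d ≤ 2 ^ 31 →
    ∀ (p σ : Int) (n0 : Nat), (σ = 1 ∨ σ = -1) → pvReach t n0 (p, σ) →
      t = p + σ * d →
      ∃ n ≤ n0 + 34 * (Nat.log2 d + 2), ∃ sp, pvReach t n (t, sp) := by
  intro d
  induction d using Nat.strong_induction_on with
  | _ d IH =>
    intro hd31 p σ n0 hσ hr ht
    rcases Nat.eq_zero_or_pos d with rfl | hdpos
    · exact ⟨n0, by omega, σ, by simpa [ht] using hr⟩
    · obtain ⟨n, hn⟩ : ∃ nn : Nat, nn = Nat.log2 d + 1 := ⟨_, rfl⟩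
      have hlow : 2 ^ (n - 1) ≤ d := by
        simpa [hn] using Nat.log2_self_le (by omega : d ≠ 0)
      have hhigh : d < 2 ^ n := by
        rw [hn]
        exact (Nat.log2_lt (by omega)).1 (Nat.lt_succ_self _)
      have hn32 : n ≤ 32 := by
        have : Nat.log2 d < 32 := (Nat.log2_lt (by omega)).2 (by
          calc d ≤ 2 ^ 31 := hd31
            _ < 2 ^ 32 := by norm_num)
        omega
      have hacc := pvAccel_chain t n n0 p σ hr
      have hdX : (d : Int) < 2 ^ n := by exact_mod_cast hhigh
      have hXpos : (1 : Int) ≤ 2 ^ n := by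
        have : (0 : Int) < 2 ^ n := by positivity
        omega
      rcases Nat.lt_or_ge d (2 ^ n - 1) with hlt | hge
      · -- overshoot: reverse and recurse on d' = 2^n - 1 - d
        set q : Int := p + σ * (2 ^ n - 1) with hq
        have hne : q + σ * 2 ^ n ≠ t := by
          rcases hσ with rfl | rfl <;>
          · rw [hq, ht]; intro hcontra; omega
        have hrev := pvReach.step hacc (pvRev_mem t q (σ * 2 ^ n) hne)
        have hflip : (if σ * 2 ^ n > 0 then (-1 : Int) else 1) = -σ := by
          rcases hσ with rfl | rfl <;> simp
        rw [hflip] at hrev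
        obtain ⟨d', hd'⟩ : ∃ dd : Nat, dd = 2 ^ n - 1 - d := ⟨_, rfl⟩
        have hd'pos : 1 ≤ d' := by omega
        have hd'lt : d' < d := by
          have h2 : 2 ^ n = 2 * 2 ^ (n - 1) := by
            rw [hn]; simp [pow_succ']
          omega
        have hd'cast : (d' : Int) = 2 ^ n - 1 - d := by
          have : ((2 ^ n - 1 - d : Nat) : Int) = ((2 ^ n : Nat) : Int) - 1 - d := by
            have h1 : d + 1 ≤ 2 ^ n := by omega
            omega
          rw [hd']
          rw [this]
          push_cast
          ring
        have ht' : t = q + (-σ) * d' := by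
          rw [hd'cast, hq, ht]
          rcases hσ with rfl | rfl <;> ring
        have hd'31 : d' ≤ 2 ^ 31 := by omega
        have hσ' : (-σ = 1 ∨ -σ = -1) := by rcases hσ with rfl | rfl <;> simp
        obtain ⟨nf, hnf, sp, hreach⟩ := IH d' hd'lt hd'31 q (-σ) (n0 + n + 1) hσ' hrev ht'
        refine ⟨nf, ?_, sp, hreach⟩
        have hlog' : Nat.log2 d' ≤ n - 2 := by
          have hd'small : d' < 2 ^ (n - 1) := by
            have h2 : 2 ^ n = 2 * 2 ^ (n - 1) := by
              rw [hn]; simp [pow_succ']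
            omega
          have : Nat.log2 d' < n - 1 := by
            apply (Nat.log2_lt (by omega)).2
            calc d' < 2 ^ (n - 1) := hd'small
              _ ≤ 2 ^ (n - 1) := le_refl _
          omega
        have hlogd : Nat.log2 d = n - 1 := by omega
        have hn2 : 2 ≤ n := by
          by_contra hcon
          have hle : 2 ^ n ≤ 2 := by
            calc 2 ^ n ≤ 2 ^ 1 := Nat.pow_le_pow_right (by norm_num) (by omega)
              _ = 2 := by norm_num
          omega
        omega
      · -- exact hit after n accelerations
        have heq : d = 2 ^ n - 1 := by omega
        have hcast : ((2 : Int) ^ n - 1) = (d : Int) := by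
          have h1 : (1 : Nat) ≤ 2 ^ n := Nat.one_le_two_pow
          have : ((2 ^ n - 1 : Nat) : Int) = ((2 ^ n : Nat) : Int) - 1 := by omega
          rw [heq, this]
          push_cast
          ring
        refine ⟨n0 + n, by omega, σ * 2 ^ n, ?_⟩
        have hpair : (t, σ * 2 ^ n) = (p + σ * ((2 : Int) ^ n - 1), σ * 2 ^ n) := by
          rw [ht, hcast]
        rw [hpair]
        exact hacc

lemma pvReach_target (t : Int) (h1 : -2147483648 ≤ t) (h2 : t ≤ 2147483648) :
    ∃ n ≤ 1999, ∃ sp, pvReach t n (t, sp) := by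
  have hbound : ∀ d : Nat, Nat.log2 d ≤ 31 → 34 * (Nat.log2 d + 2) ≤ 1998 := by
    intro d h; omega
  by_cases hpos : 0 ≤ t
  · obtain ⟨d, hd⟩ : ∃ dd : Nat, dd = t.toNat := ⟨_, rfl⟩
    have hd31 : d ≤ 2 ^ 31 := by omega
    have hcast : t = 0 + 1 * (d : Int) := by omega
    obtain ⟨n, hn, sp, hr⟩ := pvGo t d hd31 0 1 0 (Or.inl rfl) pvReach.zero hcast
    have hlog : Nat.log2 d ≤ 31 := by
      rcases Nat.eq_zero_or_pos d with hz | hdp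
      · rw [hz]; simp [Nat.log2]
      · have : Nat.log2 d < 32 := (Nat.log2_lt (by omega)).2 (by
          calc d ≤ 2 ^ 31 := hd31
            _ < 2 ^ 32 := by norm_num)
        omega
    exact ⟨n, by have := hbound d hlog; omega, sp, hr⟩
  · -- reverse first, then run the same construction leftwards
    have hrev : pvReach t 1 (0, -1) := by
      have h0 : ((0 : Int) + 1) ≠ t := by omega
      have := pvReach.step pvReach.zero (pvRev_mem t 0 1 h0)
      simpa using this
    obtain ⟨d, hd⟩ : ∃ dd : Nat, dd = (-t).toNat := ⟨_, rfl⟩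
    have hd31 : d ≤ 2 ^ 31 := by omega
    have hcast : t = 0 + (-1) * (d : Int) := by omega
    obtain ⟨n, hn, sp, hr⟩ := pvGo t d hd31 0 (-1) 1 (Or.inr rfl) hrev hcast
    have hlog : Nat.log2 d ≤ 31 := by
      rcases Nat.eq_zero_or_pos d with hz | hdp
      · rw [hz]; simp [Nat.log2]
      · have : Nat.log2 d < 32 := (Nat.log2_lt (by omega)).2 (by
          calc d ≤ 2 ^ 31 := hd31
            _ < 2 ^ 32 := by norm_num)
        omega
    exact ⟨n, by have := hbound d hlog; omega, sp, hr⟩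

-- ---- coupling: the A port's hash set + two-list deque match the model ----
def pvCpl (v : Std.HashSet (Int × Int)) (w : PySem.Set (Int × Int)) : Prop :=
  ∀ x, x ∈ v ↔ x ∈ w

lemma pvHmem_insert (v : Std.HashSet (Int × Int)) (x y : Int × Int) :
    x ∈ v.insert y ↔ x = y ∨ x ∈ v := by
  rw [Std.HashSet.mem_insert, beq_iff_eq]; exact or_congr_left ⟨Eq.symm, Eq.symm⟩

lemma pvSmem_add (w : PySem.Set (Int × Int)) (x y : Int × Int) :
    x ∈ PySem.Set.add w y ↔ x = y ∨ x ∈ w := by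
  constructor
  · intro h
    unfold PySem.Set.add at h
    split at h
    · right; exact h
    · rcases List.mem_append.1 h with h | h
      · right; exact h
      · left; simpa using h
  · rintro (rfl | h)
    · exact pvMem_add_self w x
    · exact pvMem_add w x y h

lemma pvCpl_contains {v : Std.HashSet (Int × Int)} {w : PySem.Set (Int × Int)}
    (h : pvCpl v w) (x : Int × Int) : v.contains x = PySem.Set.contains w x := by
  by_cases hx : x ∈ w
  · rw [Std.HashSet.contains_iff_mem.2 ((h x).2 hx), (pvContains_iff w x).2 hx]
  · have hv : x ∉ v := fun hc => hx ((h x).1 hc)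
    have h1 : v.contains x = false := by
      rw [← Bool.not_eq_true, Std.HashSet.contains_iff_mem]; exact hv
    have h2 : PySem.Set.contains w x = false := by
      rw [← Bool.not_eq_true, pvContains_iff]; exact hx
    rw [h1, h2]

lemma pvCpl_insert {v : Std.HashSet (Int × Int)} {w : PySem.Set (Int × Int)}
    (h : pvCpl v w) (y : Int × Int) : pvCpl (v.insert y) (PySem.Set.add w y) := by
  intro x
  rw [pvHmem_insert, pvSmem_add]
  exact or_congr_right (h x)

lemma pvRunA_flip (t : Int) (fuel : Nat) (back : List (Int × Int × Int))
    (v : Std.HashSet (Int × Int)) :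
    runA t (fuel + 1) [] back v = runA t (fuel + 1) back.reverse [] v := by
  cases hbr : back.reverse with
  | nil => simp [runA, pvDeq, hbr]
  | cons y rest => simp [runA, pvDeq, hbr]

lemma pvRunA_model (t : Int) : ∀ fuel (front back : List (Int × Int × Int)) v w,
    pvCpl v w → runA t fuel front back v = pvRunM t fuel (front ++ back.reverse) w := by
  intro fuel
  induction fuel with
  | zero => intro front back v w _; rfl
  | succ fuel ih =>
    have step : ∀ (mv p s : Int) (f back : List (Int × Int × Int)) v w, pvCpl v w →
        runA t (fuel + 1) ((mv, p, s) :: f) back v =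
          pvRunM t (fuel + 1) ((mv, p, s) :: (f ++ back.reverse)) w := by
      intro mv p s f back v w h
      by_cases hp : p = t
      · simp [runA, pvRunM, pvDeq, hp]
      · have hc1 := pvCpl_contains h (p + s, s * 2)
        simp only [runA, pvRunM, pvDeq, hp, if_false, hc1]
        by_cases hb1 : PySem.Set.contains w (p + s, s * 2) = true
        · simp only [hb1, if_true]
          by_cases hov : p + s > t ∨ p + s < t
          · have hc2 := pvCpl_contains h (p, if s > 0 then (-1 : Int) else 1)
            simp only [hov, if_true, hc2]
            by_cases hb2 : PySem.Set.contains w (p, if s > 0 then (-1 : Int) else 1) = true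
            · simp only [hb2, if_true]
              exact ih f back v w h
            · simp only [hb2, Bool.false_eq_true, if_false]
              rw [ih f ((mv + 1, p, if s > 0 then (-1 : Int) else 1) :: back) _ _
                    (pvCpl_insert h _)]
              simp
          · simp only [hov, if_false]
            exact ih f back v w h
        · simp only [hb1, Bool.false_eq_true, if_false]
          have h1 := pvCpl_insert h ((p + s, s * 2) : Int × Int)
          by_cases hov : p + s > t ∨ p + s < t
          · have hc2 := pvCpl_contains h1 (p, if s > 0 then (-1 : Int) else 1)
            simp only [hov, if_true, hc2]
            by_cases hb2 : PySem.Set.contains (PySem.Set.add w (p + s, s * 2))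
                (p, if s > 0 then (-1 : Int) else 1) = true
            · simp only [hb2, if_true]
              rw [ih f ((mv + 1, p + s, s * 2) :: back) _ _ h1]
              simp
            · simp only [hb2, Bool.false_eq_true, if_false]
              rw [ih f ((mv + 1, p, if s > 0 then (-1 : Int) else 1) ::
                    (mv + 1, p + s, s * 2) :: back) _ _ (pvCpl_insert h1 _)]
              simp
          · simp only [hov, if_false]
            rw [ih f ((mv + 1, p + s, s * 2) :: back) _ _ h1]
            simp
    intro front back v w h
    cases front with
    | cons x f => obtain ⟨mv, p, s⟩ := x; exact step mv p s f back v w h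
    | nil =>
      rw [pvRunA_flip]
      cases hbr : back.reverse with
      | nil => simp [runA, pvRunM, pvDeq]
      | cons y rest =>
        obtain ⟨mv, p, s⟩ := y
        rw [step mv p s rest [] v w h]
        simp

lemma pvCpl_init : pvCpl ((∅ : Std.HashSet (Int × Int)).insert (0, 1))
    (PySem.Set.ofList [((0 : Int), (1 : Int))]) := by
  intro x
  rw [pvHmem_insert]
  constructor
  · rintro (rfl | hx)
    · simp [PySem.Set.ofList, PySem.Set.add, PySem.Set.contains]
    · exact absurd hx Std.HashSet.not_mem_empty
  · intro hx
    left
    simpa [PySem.Set.ofList, PySem.Set.add, PySem.Set.contains] using hx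

-- ---- value of the A-side level scanner: first hitting level ----
lemma pvScanA_val (t : Int) : ∀ (j lf : Nat) (m : Int)
    (p : List (Int × Int) × PySem.Set (Int × Int)),
    (∀ i < j, ¬ ∃ c ∈ (pvIterF t i p).1, c.1 = t) →
    (∃ c ∈ (pvIterF t j p).1, c.1 = t) → j < lf →
    pvScanA t lf m p.1 p.2 = m + j := by
  intro j
  induction j with
  | zero =>
    intro lf m p _ hhit hlt
    obtain ⟨lf', rfl⟩ : ∃ k, lf = k + 1 := ⟨lf - 1, by omega⟩
    have hany : p.1.any (fun c => c.1 == t) = true := by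
      simp only [List.any_eq_true]
      obtain ⟨c, hc, hct⟩ := hhit
      exact ⟨c, hc, by simpa using hct⟩
    simp [pvScanA, hany]
  | succ j ih =>
    intro lf m p hmiss hhit hlt
    obtain ⟨lf', rfl⟩ : ∃ k, lf = k + 1 := ⟨lf - 1, by omega⟩
    have hany : p.1.any (fun c => c.1 == t) = false := by
      rw [← Bool.not_eq_true]
      intro hc
      apply hmiss 0 (by omega)
      simp only [List.any_eq_true] at hc
      obtain ⟨c, hc1, hc2⟩ := hc
      exact ⟨c, hc1, by simpa using hc2⟩
    have hrec : pvScanA t (lf' + 1) m p.1 p.2 =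
        pvScanA t lf' (m + 1) (pvE t p).1 (pvE t p).2 := by
      rw [pvScanA, if_neg (by simp [hany])]
      rfl
    rw [hrec]
    have hstep : ∀ i, pvIterF t i (pvE t p) = pvIterF t (i + 1) p := fun i => rfl
    rw [ih lf' (m + 1) (pvE t p)
      (fun i hi => by rw [hstep]; exact hmiss (i + 1) (by omega))
      (by rw [hstep]; exact hhit) (by omega)]
    push_cast
    ring

-- ---- B side: unpruned reachability and the set iteration ----
inductive pvReachU : Nat → Int × Int → Prop
  | zero : pvReachU 0 (0, 1)
  | step {n : Nat} {a b : Int × Int} : pvReachU n a → b ∈ pvSucc a → pvReachU (n + 1) b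

lemma pvStep1_eq (out : Std.HashSet (Int × Int)) (c : Int × Int) :
    pvStep1 out c = (out.insert (c.1 + c.2, 2 * c.2)).insert
      (c.1, if c.2 > 0 then -1 else 1) := rfl

lemma pvStep1_mem (out : Std.HashSet (Int × Int)) (c x : Int × Int) :
    x ∈ pvStep1 out c ↔ x ∈ pvSucc c ∨ x ∈ out := by
  rw [pvStep1_eq, pvHmem_insert, pvHmem_insert]
  simp only [pvSucc, List.mem_cons, List.not_mem_nil, or_false]
  tauto

lemma pvFoldStep_mem_of_mem (l : List (Int × Int)) :
    ∀ (acc : Std.HashSet (Int × Int)) x, x ∈ acc → x ∈ l.foldl pvStep1 acc := by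
  induction l with
  | nil => intro acc x h; simpa using h
  | cons c l ih =>
    intro acc x h
    simp only [List.foldl_cons]
    exact ih _ x ((pvStep1_mem _ _ _).2 (Or.inr h))

lemma pvFoldStep_child (l : List (Int × Int)) :
    ∀ (acc : Std.HashSet (Int × Int)) a b, a ∈ l → b ∈ pvSucc a →
      b ∈ l.foldl pvStep1 acc := by
  induction l with
  | nil => intro acc a b h; simp at h
  | cons c l ih =>
    intro acc a b ha hb
    simp only [List.foldl_cons]
    rcases List.mem_cons.1 ha with rfl | ha
    · exact pvFoldStep_mem_of_mem l _ b ((pvStep1_mem _ _ _).2 (Or.inl hb))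
    · exact ih _ a b ha hb

lemma pvFoldStep_src (l : List (Int × Int)) :
    ∀ (acc : Std.HashSet (Int × Int)) x, x ∈ l.foldl pvStep1 acc →
      x ∈ acc ∨ ∃ a ∈ l, x ∈ pvSucc a := by
  induction l with
  | nil => intro acc x h; left; simpa using h
  | cons c l ih =>
    intro acc x h
    simp only [List.foldl_cons] at h
    rcases ih _ x h with hin | ⟨a, ha, hx⟩
    · rcases (pvStep1_mem _ _ _).1 hin with hx | hin
      · right; exact ⟨c, List.mem_cons_self, hx⟩
      · left; exact hin
    · right; exact ⟨a, List.mem_cons_of_mem _ ha, hx⟩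

lemma pvStepB_mono (S : Std.HashSet (Int × Int)) (x : Int × Int) (h : x ∈ S) :
    x ∈ stepB S := pvFoldStep_mem_of_mem S.toList S x h

lemma pvStepB_child (S : Std.HashSet (Int × Int)) (a b : Int × Int)
    (ha : a ∈ S) (hb : b ∈ pvSucc a) : b ∈ stepB S :=
  pvFoldStep_child S.toList S a b (Std.HashSet.mem_toList.2 ha) hb

lemma pvStepB_src (S : Std.HashSet (Int × Int)) (x : Int × Int) (h : x ∈ stepB S) :
    x ∈ S ∨ ∃ a ∈ S, x ∈ pvSucc a := by
  rcases pvFoldStep_src S.toList S x h with hin | ⟨a, ha, hx⟩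
  · left; exact hin
  · right; exact ⟨a, Std.HashSet.mem_toList.1 ha, hx⟩

def pvIterS : Nat → Std.HashSet (Int × Int) → Std.HashSet (Int × Int)
  | 0, S => S
  | j + 1, S => pvIterS j (stepB S)

lemma pvIterS_succ' (j : Nat) (S : Std.HashSet (Int × Int)) :
    pvIterS (j + 1) S = stepB (pvIterS j S) := by
  induction j generalizing S with
  | zero => rfl
  | succ j ih => rw [pvIterS, ih]; rfl

def pvS0 : Std.HashSet (Int × Int) := (∅ : Std.HashSet (Int × Int)).insert (0, 1)

lemma pvS0_mem (x : Int × Int) : x ∈ pvS0 ↔ x = ((0 : Int), (1 : Int)) := by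
  unfold pvS0
  rw [pvHmem_insert]
  simp [Std.HashSet.not_mem_empty]

lemma pvIterS_mono_le {i j : Nat} (hij : i ≤ j) (x : Int × Int)
    (h : x ∈ pvIterS i pvS0) : x ∈ pvIterS j pvS0 := by
  induction j with
  | zero => have : i = 0 := by omega
            subst this; exact h
  | succ j ih =>
    by_cases hj : i = j + 1
    · subst hj; exact h
    · rw [pvIterS_succ']
      exact pvStepB_mono _ x (ih (by omega))

lemma pvIterS_sound : ∀ j x, x ∈ pvIterS j pvS0 → ∃ m ≤ j, pvReachU m x := by
  intro j
  induction j with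
  | zero =>
    intro x h
    rw [pvIterS] at h
    exact ⟨0, le_refl 0, (pvS0_mem x).1 h ▸ pvReachU.zero⟩
  | succ j ih =>
    intro x h
    rw [pvIterS_succ'] at h
    rcases pvStepB_src _ x h with hin | ⟨a, ha, hx⟩
    · obtain ⟨m, hm, hr⟩ := ih x hin
      exact ⟨m, by omega, hr⟩
    · obtain ⟨m, hm, hr⟩ := ih a ha
      exact ⟨m + 1, by omega, pvReachU.step hr hx⟩

lemma pvIterS_complete : ∀ {m : Nat} {x : Int × Int}, pvReachU m x →
    ∀ j, m ≤ j → x ∈ pvIterS j pvS0 := by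
  intro m x h
  induction h with
  | zero =>
    intro j _
    refine pvIterS_mono_le (Nat.zero_le j) _ ?_
    rw [pvIterS]
    exact (pvS0_mem _).2 rfl
  | @step n a b _ hb ih =>
    intro j hj
    refine pvIterS_mono_le (show n + 1 ≤ j from hj) _ ?_
    rw [pvIterS_succ']
    exact pvStepB_child _ a b (ih n (le_refl n)) hb

-- ---- relating the pruned and unpruned relations ----
lemma pvCand_sub (t : Int) (a b : Int × Int) (h : b ∈ pvCand t a) : b ∈ pvSucc a := by
  unfold pvCand at h
  unfold pvSucc
  split at h <;> simp only [List.mem_append, List.mem_cons] at h ⊢ <;>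
    rcases h with h | h <;> simp_all [mul_comm]

lemma pvReach_toU (t : Int) : ∀ {n s}, pvReach t n s → pvReachU n s := by
  intro n s h
  induction h with
  | zero => exact pvReachU.zero
  | step _ hb ih => exact pvReachU.step ih (pvCand_sub t _ _ hb)

lemma pvU_prune (t : Int) : ∀ {n b}, pvReachU n b →
    (∃ k ≤ n, pvReach t k b) ∨ (∃ k ≤ n, ∃ sp, pvReach t k (t, sp)) := by
  intro n b h
  induction h with
  | zero => exact Or.inl ⟨0, le_refl 0, pvReach.zero⟩
  | @step n a b _ hb ih =>
    rcases ih with ⟨k, hk, hra⟩ | ⟨k, hk, sp, hr⟩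
    · by_cases hmem : b ∈ pvCand t a
      · exact Or.inl ⟨k + 1, by omega, pvReach.step hra hmem⟩
      · -- b must be the reverse child and the prune fired: a.1 + a.2 = t
        have hbrev : b = (a.1, if a.2 > 0 then (-1 : Int) else 1) := by
          simp only [pvSucc, List.mem_cons] at hb
          rcases hb with rfl | hb
          · exact absurd (by simpa [mul_comm] using pvAccel_mem t a) hmem
          · simpa using hb
        have hts : a.1 + a.2 = t := by
          by_contra hne
          exact hmem (hbrev ▸ pvRev_mem t a.1 a.2 hne)
        refine Or.inr ⟨k + 1, by omega, a.2 * 2, ?_⟩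
        have := pvReach.step hra (pvAccel_mem t a)
        rwa [hts] at this
    · exact Or.inr ⟨k, by omega, sp, hr⟩

-- ---- value of the B port: first level whose reached set hits the target ----
lemma pvRunBn_val (t : Int) : ∀ (j lf : Nat) (n : Int) (S : Std.HashSet (Int × Int)),
    (∀ i < j, ¬ ∃ x ∈ pvIterS i S, x.1 = t) →
    (∃ x ∈ pvIterS j S, x.1 = t) → j < lf →
    runBn t lf n S = n + j := by
  intro j
  induction j with
  | zero =>
    intro lf n S _ hhit hlt
    obtain ⟨lf', rfl⟩ : ∃ k, lf = k + 1 := ⟨lf - 1, by omega⟩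
    have hany : S.toList.any (fun c => c.1 == t) = true := by
      simp only [List.any_eq_true]
      obtain ⟨c, hc, hct⟩ := hhit
      exact ⟨c, Std.HashSet.mem_toList.2 hc, by simpa using hct⟩
    simp [runBn, hany]
  | succ j ih =>
    intro lf n S hmiss hhit hlt
    obtain ⟨lf', rfl⟩ : ∃ k, lf = k + 1 := ⟨lf - 1, by omega⟩
    have hany : S.toList.any (fun c => c.1 == t) = false := by
      rw [← Bool.not_eq_true]
      intro hc
      apply hmiss 0 (by omega)
      simp only [List.any_eq_true] at hc
      obtain ⟨c, hc1, hc2⟩ := hc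
      exact ⟨c, Std.HashSet.mem_toList.1 hc1, by simpa using hc2⟩
    rw [runBn, if_neg (by simp [hany])]
    have hstep : ∀ i, pvIterS i (stepB S) = pvIterS (i + 1) S := fun i => rfl
    rw [ih lf' (n + 1) (stepB S)
      (fun i hi => by rw [hstep]; exact hmiss (i + 1) (by omega))
      (by rw [hstep]; exact hhit) (by omega)]
    push_cast
    ring

-- ===== VERDICT (by name: the statement is the Claim_ definition above) =====
theorem solution_spec : Claim_equal_solution := by
  intro target hdom
  classical
  unfold Spec_solution solution solution_alt
  have hD : -2147483648 ≤ target ∧ target ≤ 2147483648 := by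
    have := hdom
    unfold Dom_solution pvDomInt at this
    exact of_decide_eq_true this
  -- ℓ = the least depth at which A's pruned relation reaches the target position
  obtain ⟨N, hN, spN, hrN⟩ := pvReach_target target hD.1 hD.2
  have hex : ∃ n, ∃ sp, pvReach target n (target, sp) := ⟨N, spN, hrN⟩
  set l := Nat.find hex with hldef
  obtain ⟨spl, hrl⟩ := Nat.find_spec hex
  have hl1999 : l ≤ 1999 := le_trans (Nat.find_min' hex ⟨spN, hrN⟩) hN
  -- the frontier scan first hits at exactly level l
  have hFhit : ∃ c ∈ (pvIter target l).1, c.1 = target := by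
    obtain ⟨j, hj, hmem⟩ := pvIter_inv2 target l (target, spl) (pvReach_mem target l _ hrl)
    have hge : l ≤ j := Nat.find_min' hex ⟨spl, pvIter_sound target j _ hmem⟩
    have : j = l := by omega
    subst this
    exact ⟨(target, spl), hmem, rfl⟩
  have hFmiss : ∀ i < l, ¬ ∃ c ∈ (pvIter target i).1, c.1 = target := by
    intro i hi ⟨c, hc, hct⟩
    exact Nat.find_min hex hi ⟨c.2, by
      have := pvIter_sound target i c hc
      rwa [show c = (c.1, c.2) from rfl, hct] at this⟩
  -- the reached-set iteration also first hits at exactly level l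
  have hShit : ∃ x ∈ pvIterS l pvS0, x.1 = target := by
    refine ⟨(target, spl), pvIterS_complete (pvReach_toU target hrl) l (le_refl l), rfl⟩
  have hSmiss : ∀ i < l, ¬ ∃ x ∈ pvIterS i pvS0, x.1 = target := by
    intro i hi ⟨x, hx, hxt⟩
    obtain ⟨m, hm, hrU⟩ := pvIterS_sound i x hx
    rcases pvU_prune target hrU with ⟨k, hk, hr⟩ | ⟨k, hk, sp, hr⟩
    · exact Nat.find_min hex (by omega : k < l) ⟨x.2, by
        rwa [show x = (x.1, x.2) from rfl, hxt] at hr⟩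
    · exact Nat.find_min hex (by omega : k < l) ⟨sp, hr⟩
  -- A's port equals the level scanner, whose value is l
  have hhit2000 : pvHit target 2000 pvP0 := ⟨l, by omega, hFhit⟩
  have hA : runA target (pvNeed 2000 + 1) [(0, 0, 1)] []
      ((∅ : Std.HashSet (Int × Int)).insert (0, 1)) = (0 : Int) + l := by
    rw [pvRunA_model target _ _ _ _ _ pvCpl_init]
    simp only [List.reverse_nil, List.append_nil]
    have hbr := pvBridge target 2000 [((0 : Int), (1 : Int))]
      (PySem.Set.ofList [((0 : Int), (1 : Int))]) 0 1 (by simpa [pvP0] using hhit2000)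
    have hbr' : pvRunM target (pvNeed 2000 + 1) [((0 : Int), (0 : Int), (1 : Int))]
        (PySem.Set.ofList [((0 : Int), (1 : Int))]) =
        pvScanA target 2000 0 [((0 : Int), (1 : Int))]
          (PySem.Set.ofList [((0 : Int), (1 : Int))]) := by
      simpa [pvTag] using hbr
    rw [hbr']
    have := pvScanA_val target l 2000 0 pvP0
      (fun i hi => hFmiss i hi) hFhit (by omega)
    simpa [pvP0] using this
  have hB : runBn target 2000 0 ((∅ : Std.HashSet (Int × Int)).insert (0, 1)) = (0 : Int) + l := by
    have := pvRunBn_val target l 2000 0 pvS0 hSmiss hShit (by omega)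
    simpa [pvS0] using this
  rw [hA, hB]
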